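-- pv_equiv track=rewrite | github.com/ZIM-INNERVATE/interactive_data_visualizer | utils/utils.py | combine_tails
-- ===== SOURCE A (Python) =====
-- def combine_tails(hist, bin_edges, expected_freq=5, tail=0):
--     """
--     Combine tails if number of bin count is less than expected freq
--     """
--     if hist[tail] < expected_freq:
--         #todo: does not work with [5,1,1,8,11]
--         count = hist.pop(tail)
--         hist[tail] += count
--
--         # pop the next edge, and keep leftmost/rightmost edge
--         if tail == 0: bin_edges.pop(tail+1)
--         else: bin_edges.pop(tail-1)
--
--         return combine_tails(hist, bin_edges, expected_freq, tail)
--     else: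
--         return hist, bin_edges
-- ===== SOURCE B (Python) =====
-- # Merge under-populated tail bins with one running-sum scan and a single slice
-- # assembly instead of repeated pops and recursion; mutates hist/bin_edges in
-- # place and returns them.
-- def combine_tails(hist, bin_edges, expected_freq=5, tail=0):
--     if tail >= 0:
--         h, e, p = hist, bin_edges, tail
--         cut = 1 if tail == 0 else tail - 1
--     else:
--         # normalize a right tail to a left tail by working on reversed copies
--         h, e, p = hist[::-1], bin_edges[::-1], -tail - 1
--         cut = -tail
--     total = h[p]
--     k = 0
--     while total < expected_freq:
--         k += 1
--         total += h[p + k]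
--     new_h = h[:p] + [total] + h[p + k + 1:]
--     new_e = e if k == 0 else e[:cut] + e[cut + k:]
--     if tail < 0:
--         new_h.reverse()
--         new_e.reverse()
--     hist[:] = new_h
--     bin_edges[:] = new_e
--     return hist, bin_edges
-- ===== Notes on version B (the rewrite author's own statement) =====
-- stated objective: alternative
-- what changed: Replaces the recursion with repeated list.pop calls by a single running-sum scan that finds the total merge length k at once, followed by one slice-assembly of both lists (negative tails handled by reversing, merging, and reversing back); Pre_ excludes exactly the inputs on which A raises IndexError (tail out of range, bins exhausted mid-merge, or bin_edges exhausted).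
import Mathlib
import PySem

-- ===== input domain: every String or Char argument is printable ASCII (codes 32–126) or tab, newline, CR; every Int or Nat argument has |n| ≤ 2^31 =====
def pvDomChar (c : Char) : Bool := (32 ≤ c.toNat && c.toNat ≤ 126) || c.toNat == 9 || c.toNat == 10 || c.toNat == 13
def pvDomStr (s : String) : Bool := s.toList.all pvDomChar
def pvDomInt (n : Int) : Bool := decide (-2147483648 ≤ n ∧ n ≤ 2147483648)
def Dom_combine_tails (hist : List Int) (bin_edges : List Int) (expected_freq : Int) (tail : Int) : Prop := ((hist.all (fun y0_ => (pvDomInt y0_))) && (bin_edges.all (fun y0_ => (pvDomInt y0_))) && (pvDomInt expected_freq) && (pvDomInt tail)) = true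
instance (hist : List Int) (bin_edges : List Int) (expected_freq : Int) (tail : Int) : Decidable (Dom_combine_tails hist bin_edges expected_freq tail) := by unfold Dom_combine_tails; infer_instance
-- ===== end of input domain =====

-- B replaces A's pop-and-recurse loop by one running-sum scan that finds the whole merge length k,
-- then assembles both result lists with slices (negative tails via reverse / merge / reverse back);
-- equivalence is about the return value (A also mutates its arguments in place; B's Python mirrors
-- that with slice assignment on success).


-- ===== PORT A =====
-- literal transliteration of A: `hist[tail]`, `hist.pop(tail)`, `hist[tail] += count`,
-- `bin_edges.pop(tail+1)` / `bin_edges.pop(tail-1)`, then the recursive call.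
-- A `none` of a PySem primitive is Python's IndexError: those inputs are outside Pre_ and the
-- port just returns the current lists there.
def combine_tails (hist : List Int) (bin_edges : List Int) (expected_freq : Int) (tail : Int) : List Int × List Int :=
  match PySem.List.pyGet? hist tail with
  | none => (hist, bin_edges)
  | some v =>
    if v < expected_freq then
      match hpop : PySem.List.pop? hist tail with
      | none => (hist, bin_edges)
      | some r =>
        match PySem.List.pyGet? r.2 tail with
        | none => (r.2, bin_edges)
        | some w =>
          let hist2 := PySem.List.pySetD r.2 tail (w + r.1)
          match (if tail = 0 then PySem.List.pop? bin_edges (tail + 1) else PySem.List.pop? bin_edges (tail - 1)) with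
          | none => (hist2, bin_edges)
          | some q => combine_tails hist2 q.2 expected_freq tail
    else (hist, bin_edges)
termination_by hist.length
decreasing_by
  have h1 := PySem.List.length_of_pop?_eq_some (xs := hist) (i := tail) hpop
  simp only [PySem.List.length_pySetD]
  omega

-- ===== PORT B =====
-- the scan loop of Source B: walk the suffix accumulating `total`, returning (k, total) at the
-- first index where `total` reaches expected_freq (none = the suffix runs out = IndexError in Source B)
def scanMerge (l : List Int) (f : Int) (s : Int) (j : Nat) : Option (Nat × Int) :=
  match l with
  | [] => none
  | x :: rest =>
    if f ≤ s + x then some (j, s + x) else scanMerge rest f (s + x) (j + 1)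

-- the slice assembly of Source B on the oriented lists h, e with scan start p and edge cut index
def altCore (h : List Int) (e : List Int) (f : Int) (p : Nat) (cut : Nat) : Option (List Int × List Int) :=
  match scanMerge (h.drop p) f 0 0 with
  | none => none
  | some (k, s) =>
    some (h.take p ++ s :: h.drop (p + k + 1),
          if k = 0 then e else e.take cut ++ e.drop (cut + k))

def combine_tails_alt (hist : List Int) (bin_edges : List Int) (expected_freq : Int) (tail : Int) : List Int × List Int :=
  if 0 ≤ tail then
    match altCore hist bin_edges expected_freq tail.toNat (if tail = 0 then 1 else (tail - 1).toNat) with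
    | none => (hist, bin_edges)        -- Source B raises IndexError here (outside Pre_)
    | some r => r
  else
    match altCore hist.reverse bin_edges.reverse expected_freq (-tail - 1).toNat (-tail).toNat with
    | none => (hist, bin_edges)        -- Source B raises IndexError here (outside Pre_)
    | some r => (r.1.reverse, r.2.reverse)

-- ===== PRECONDITION & SPEC =====
-- Pre_ holds exactly where the Python A returns (no IndexError): on the oriented view
-- (reverse everything for a negative tail) some merge length k reaches expected_freq before the
-- histogram runs out, and bin_edges is long enough for the k edge pops.
def Pre_combine_tails (hist : List Int) (bin_edges : List Int) (expected_freq : Int) (tail : Int) : Prop :=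
  let h := if 0 ≤ tail then hist else hist.reverse
  let e := if 0 ≤ tail then bin_edges else bin_edges.reverse
  let p : Nat := if 0 ≤ tail then tail.toNat else (-tail - 1).toNat
  let cut : Nat := if 0 ≤ tail then (if tail = 0 then 1 else (tail - 1).toNat) else (-tail).toNat
  ∃ k, k < h.length ∧ p + k < h.length ∧ expected_freq ≤ ((h.drop p).take (k + 1)).sum ∧
    (∀ j < k, ((h.drop p).take (j + 1)).sum < expected_freq) ∧ (k = 0 ∨ cut + k ≤ e.length)
instance (hist : List Int) (bin_edges : List Int) (expected_freq : Int) (tail : Int) : Decidable (Pre_combine_tails hist bin_edges expected_freq tail) := by unfold Pre_combine_tails; infer_instance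

def pvWitness_combine_tails : List Int × List Int × Int × Int := ([1, 2, 9], [0, 1, 2, 3], 5, 0)

def Spec_combine_tails (hist : List Int) (bin_edges : List Int) (expected_freq : Int) (tail : Int) (out : List Int × List Int) : Prop := out = combine_tails_alt hist bin_edges expected_freq tail
instance (hist : List Int) (bin_edges : List Int) (expected_freq : Int) (tail : Int) (out : List Int × List Int) : Decidable (Spec_combine_tails hist bin_edges expected_freq tail out) := by unfold Spec_combine_tails; infer_instance

-- ===== CLAIM (what is proved, stated in full; the proofs are below) =====
def Claim_equal_combine_tails : Prop := ∀ (hist : List Int) (bin_edges : List Int) (expected_freq : Int) (tail : Int), Dom_combine_tails hist bin_edges expected_freq tail → Pre_combine_tails hist bin_edges expected_freq tail → Spec_combine_tails hist bin_edges expected_freq tail (combine_tails hist bin_edges expected_freq tail)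

-- ===== LEMMAS AND PROOFS =====

lemma scanMerge_shift (l : List Int) (f s : Int) (j : Nat) :
    scanMerge l f s (j + 1) = (scanMerge l f s j).map (fun r => (r.1 + 1, r.2)) := by
  induction l generalizing s j with
  | nil => simp [scanMerge]
  | cons x rest ih =>
    simp only [scanMerge]
    split
    · simp
    · exact ih (s + x) (j + 1)

lemma scanMerge_isSome (l : List Int) (f s : Int) (j : Nat) (k : Nat)
    (hk : k < l.length) (hs : f ≤ s + (l.take (k + 1)).sum) : (scanMerge l f s j).isSome := by
  induction l generalizing s j k with
  | nil => simp at hk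
  | cons x rest ih =>
    simp only [scanMerge]
    split
    · simp
    · rename_i hlt
      match k with
      | 0 =>
        simp at hs
        omega
      | k + 1 =>
        apply ih (s + x) (j + 1) k (by simpa using hk)
        simp [List.take_succ_cons, List.sum_cons] at hs ⊢
        linarith [hs]

lemma drop_len_append (pre C : List Int) (t : Nat) : (pre ++ C).drop (pre.length + t) = C.drop t := by
  rw [List.drop_append]
  simp

lemma take_len_append (pre C : List Int) : (pre ++ C).take pre.length = pre := by
  simp

lemma altCore_stop (h e : List Int) (f : Int) (p cut : Nat) (hp : p < h.length)
    (hf : f ≤ h[p]) : altCore h e f p cut = some (h, e) := by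
  rw [altCore, List.drop_eq_getElem_cons hp]
  simp only [scanMerge, zero_add, if_pos hf]
  have heq : h.take p ++ h[p] :: h.drop (p + 0 + 1) = h := by
    rw [show p + 0 + 1 = p + 1 by omega, ← List.drop_eq_getElem_cons hp, List.take_append_drop]
  rw [heq]
  simp

lemma altCore_step (h e : List Int) (f : Int) (p cut : Nat)
    (hp : p + 1 < h.length) (hx : h[p] < f) (hcut : cut ≤ e.length) :
    altCore h e f p cut
      = altCore (h.take p ++ (h[p] + h[p + 1]) :: h.drop (p + 2)) (e.take cut ++ e.drop (cut + 1)) f p cut := by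
  have hlt : (h.take p).length = p := by simp; omega
  have hel : (e.take cut).length = cut := by simp; omega
  have hdropL : h.drop p = h[p] :: h[p+1] :: h.drop (p+2) := by
    rw [List.drop_eq_getElem_cons (by omega), List.drop_eq_getElem_cons (by omega)]
  have hdr : ∀ (C : List Int) (t : Nat), (h.take p ++ C).drop (p + t) = C.drop t := by
    intro C t
    have := drop_len_append (h.take p) C t
    rwa [hlt] at this
  have htk : ∀ C : List Int, (h.take p ++ C).take p = h.take p := by
    intro C
    have := take_len_append (h.take p) C
    rwa [hlt] at this
  have hdre : ∀ (C : List Int) (t : Nat), (e.take cut ++ C).drop (cut + t) = C.drop t := by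
    intro C t
    have := drop_len_append (e.take cut) C t
    rwa [hel] at this
  have hte : ∀ C : List Int, (e.take cut ++ C).take cut = e.take cut := by
    intro C
    have := take_len_append (e.take cut) C
    rwa [hel] at this
  have hdropR : (h.take p ++ (h[p] + h[p + 1]) :: h.drop (p + 2)).drop p = (h[p] + h[p + 1]) :: h.drop (p + 2) := by
    have := hdr ((h[p] + h[p + 1]) :: h.drop (p + 2)) 0
    simpa using this
  by_cases hxy : f ≤ h[p] + h[p+1]
  · have hscL : scanMerge (h.drop p) f 0 0 = some (1, h[p] + h[p+1]) := by
      rw [hdropL]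
      simp only [scanMerge, zero_add, if_neg (not_le.2 hx), if_pos hxy]
    have hscR : scanMerge ((h.take p ++ (h[p] + h[p + 1]) :: h.drop (p + 2)).drop p) f 0 0 = some (0, h[p] + h[p+1]) := by
      rw [hdropR]
      simp only [scanMerge, zero_add, if_pos hxy]
    rw [altCore, altCore, hscL, hscR]
    simp only [Option.some.injEq, Prod.mk.injEq]
    refine ⟨?_, by simp⟩
    rw [htk]
    congr 1
    congr 1
    exact (hdr ((h[p] + h[p + 1]) :: h.drop (p + 2)) 1).symm
  · have hscL : scanMerge (h.drop p) f 0 0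
        = (scanMerge (h.drop (p+2)) f (h[p] + h[p+1]) 1).map (fun r => (r.1 + 1, r.2)) := by
      rw [hdropL]
      simp only [scanMerge, zero_add, if_neg (not_le.2 hx), if_neg hxy]
      exact scanMerge_shift _ _ _ _
    have hscR : scanMerge ((h.take p ++ (h[p] + h[p + 1]) :: h.drop (p + 2)).drop p) f 0 0
        = scanMerge (h.drop (p+2)) f (h[p] + h[p+1]) 1 := by
      rw [hdropR]
      simp only [scanMerge, zero_add, if_neg hxy]
    rw [altCore, altCore, hscL, hscR]
    cases hsc : scanMerge (h.drop (p+2)) f (h[p] + h[p+1]) 1 with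
    | none => simp
    | some r =>
      simp only [Option.map_some, Option.some.injEq, Prod.mk.injEq]
      constructor
      · rw [htk]
        congr 1
        congr 1
        calc h.drop (p + (r.1 + 1) + 1) = (h.drop (p+2)).drop r.1 := by
              rw [List.drop_drop]; congr 1; omega
          _ = ((h[p] + h[p + 1]) :: h.drop (p + 2)).drop (r.1 + 1) := List.drop_succ_cons.symm
          _ = (h.take p ++ (h[p] + h[p + 1]) :: h.drop (p + 2)).drop (p + r.1 + 1) :=
              (hdr ((h[p] + h[p + 1]) :: h.drop (p + 2)) (r.1 + 1)).symm
      · have hne : r.1 + 1 ≠ 0 := by omega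
        rw [if_neg hne]
        rcases Nat.eq_zero_or_pos r.1 with h0 | hpos
        · rw [h0]
          simp
        · rw [if_neg (by omega), hte]
          congr 1
          calc e.drop (cut + (r.1 + 1)) = (e.drop (cut + 1)).drop r.1 := by
                rw [List.drop_drop]; congr 1; omega
            _ = (e.take cut ++ e.drop (cut + 1)).drop (cut + r.1) := (hdre (e.drop (cut + 1)) r.1).symm

-- ---- index-primitive computation lemmas ----

lemma pyIdx?_nat (n k : Nat) (h : k < n) : PySem.List.pyIdx? n (k : Int) = some k := by
  unfold PySem.List.pyIdx?
  rw [if_pos (by positivity), if_pos (by exact_mod_cast h)]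
  simp

lemma pyIdx?_neg (n k : Nat) (h1 : 0 < k) (h2 : k ≤ n) : PySem.List.pyIdx? n (-(k : Int)) = some (n - k) := by
  unfold PySem.List.pyIdx?
  rw [if_neg (by omega), if_pos (by omega)]
  simp

lemma pyGet?_idx (xs : List Int) (t : Int) (q : Nat) (h : PySem.List.pyIdx? xs.length t = some q)
    (hq : q < xs.length) : PySem.List.pyGet? xs t = some xs[q] := by
  unfold PySem.List.pyGet?
  rw [h]
  simp [List.getElem?_eq_getElem hq]

lemma pop?_idx (xs : List Int) (t : Int) (q : Nat) (h : PySem.List.pyIdx? xs.length t = some q)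
    (hq : q < xs.length) : PySem.List.pop? xs t = some (xs[q], xs.eraseIdx q) := by
  unfold PySem.List.pop?
  rw [h]
  simp [List.getElem?_eq_getElem hq]

lemma pySetD_idx (xs : List Int) (t : Int) (v : Int) (q : Nat)
    (h : PySem.List.pyIdx? xs.length t = some q) :
    PySem.List.pySetD xs t v = xs.set q v := by
  unfold PySem.List.pySetD PySem.List.pySet?
  rw [h]
  simp

-- ---- take/drop normal forms for A's erase-then-set step ----

lemma erase_set_fwd (xs : List Int) (p : Nat) (v : Int) (hp : p + 1 < xs.length) :
    (xs.eraseIdx p).set p v = xs.take p ++ v :: xs.drop (p + 2) := by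
  rw [List.eraseIdx_eq_take_drop_succ,
    List.set_eq_take_cons_drop v (by simp [List.length_eraseIdx]; omega)]
  have hlt : (xs.take p).length = p := by simp; omega
  congr 1
  · rw [List.take_append_of_le_length (by omega), List.take_take]
    simp
  · congr 1
    rw [show p + 1 = (xs.take p).length + 1 by omega, drop_len_append]
    simp [List.drop_drop]
    congr 1
    omega

lemma erase_set_bwd (xs : List Int) (i : Nat) (v : Int) (h1 : 1 ≤ i) (h2 : i < xs.length) :
    (xs.eraseIdx i).set (i - 1) v = xs.take (i - 1) ++ v :: xs.drop (i + 1) := by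
  rw [List.eraseIdx_eq_take_drop_succ,
    List.set_eq_take_cons_drop v (by simp [List.length_eraseIdx]; omega)]
  have hlt : (xs.take i).length = i := by simp; omega
  congr 1
  · rw [List.take_append_of_le_length (by omega), List.take_take]
    congr 1
    omega
  · congr 1
    rw [show i - 1 + 1 = i by omega]
    have := drop_len_append (xs.take i) (xs.drop (i + 1)) 0
    rw [hlt] at this
    simpa using this

lemma reverse_mid (xs : List Int) (a b : Nat) (v : Int) :
    (xs.take a ++ v :: xs.drop b).reverse
      = (xs.drop b).reverse ++ v :: (xs.take a).reverse := by
  rw [List.reverse_append, List.reverse_cons]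
  simp

-- ---- one-step / stop unfoldings of the port of A ----

lemma A_stop (hist e : List Int) (f tl : Int) (x : Int)
    (h1 : PySem.List.pyGet? hist tl = some x) (hx : ¬ x < f) :
    combine_tails hist e f tl = (hist, e) := by
  rw [combine_tails, h1]
  simp [hx]

lemma A_step (hist e : List Int) (f tl : Int) (x w : Int) (hist' : List Int) (q : Int × List Int)
    (h1 : PySem.List.pyGet? hist tl = some x) (hx : x < f)
    (h2 : PySem.List.pop? hist tl = some (x, hist'))
    (h3 : PySem.List.pyGet? hist' tl = some w)
    (h4 : (if tl = 0 then PySem.List.pop? e (tl + 1) else PySem.List.pop? e (tl - 1)) = some q) :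
    combine_tails hist e f tl = combine_tails (PySem.List.pySetD hist' tl (w + x)) q.2 f tl := by
  rw [combine_tails, h1]
  simp only [if_pos hx]
  split
  · rename_i heq
    rw [h2] at heq
    cases heq
  · rename_i r heq
    rw [h2] at heq
    injection heq with heq
    subst heq
    split
    · rename_i heq2
      rw [h3] at heq2
      cases heq2
    · rename_i w2 heq2
      rw [h3] at heq2
      injection heq2 with heq2
      subst heq2
      rw [h4]

-- ---- unfoldings of the port of B ----

lemma alt_pos (hist e : List Int) (f tl : Int) (h0 : 0 ≤ tl) (r : List Int × List Int)
    (hr : altCore hist e f tl.toNat (if tl = 0 then 1 else (tl - 1).toNat) = some r) :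
    combine_tails_alt hist e f tl = r := by
  rw [combine_tails_alt, if_pos h0, hr]

lemma alt_neg (hist e : List Int) (f tl : Int) (h0 : ¬ 0 ≤ tl) (r : List Int × List Int)
    (hr : altCore hist.reverse e.reverse f (-tl - 1).toNat (-tl).toNat = some r) :
    combine_tails_alt hist e f tl = (r.1.reverse, r.2.reverse) := by
  rw [combine_tails_alt, if_neg h0, hr]

-- ---- Pre bookkeeping ----

lemma k_pos (h : List Int) (f : Int) (p k : Nat) (hk : p + k < h.length)
    (hsum : f ≤ ((h.drop p).take (k + 1)).sum) (hx : h[p]'(by omega) < f) : 1 ≤ k := by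
  by_contra hc
  push_neg at hc
  interval_cases k
  have hd : h.drop p = h[p]'(by omega) :: h.drop (p + 1) := List.drop_eq_getElem_cons (by omega)
  rw [hd] at hsum
  rw [List.take_succ_cons, List.take_zero, List.sum_cons, List.sum_nil] at hsum
  omega

lemma sum_bridge (h : List Int) (p : Nat) (hp : p + 1 < h.length) (j : Nat) :
    (((h.take p ++ (h[p]'(by omega) + h[p + 1]'(by omega)) :: h.drop (p + 2)).drop p).take (j + 1)).sum
      = ((h.drop p).take (j + 2)).sum := by
  have hlt : (h.take p).length = p := by simp; omega
  have hdropR : (h.take p ++ (h[p]'(by omega) + h[p+1]) :: h.drop (p + 2)).drop p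
      = (h[p]'(by omega) + h[p+1]) :: h.drop (p + 2) := by
    have := drop_len_append (h.take p) ((h[p]'(by omega) + h[p+1]) :: h.drop (p + 2)) 0
    rw [hlt] at this
    simpa using this
  have hdropL : h.drop p = h[p]'(by omega) :: h[p+1] :: h.drop (p+2) := by
    rw [List.drop_eq_getElem_cons (by omega), List.drop_eq_getElem_cons (by omega)]
  rw [hdropR, hdropL, show j + 2 = (j + 1) + 1 from rfl, List.take_succ_cons,
    List.take_succ_cons, List.take_succ_cons, List.sum_cons, List.sum_cons, List.sum_cons]
  ring

-- ---- oriented step data for the precondition ----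

lemma view_len (h : List Int) (p : Nat) (v : Int) (hp1 : p + 1 < h.length) :
    (h.take p ++ v :: h.drop (p + 2)).length = h.length - 1 := by
  simp
  omega

lemma pre_data_step (h e : List Int) (f : Int) (p cut k : Nat)
    (hp1 : p + 1 < h.length)
    (hk : p + k < h.length) (hsum : f ≤ ((h.drop p).take (k + 1)).sum)
    (hmin : ∀ j < k, ((h.drop p).take (j + 1)).sum < f)
    (hk1 : 1 ≤ k) (hedge : cut + k ≤ e.length) :
    ∃ k2, k2 < (h.take p ++ (h[p]'(by omega) + h[p + 1]'(by omega)) :: h.drop (p + 2)).length ∧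
      p + k2 < (h.take p ++ (h[p]'(by omega) + h[p + 1]'(by omega)) :: h.drop (p + 2)).length ∧
      f ≤ (((h.take p ++ (h[p]'(by omega) + h[p + 1]'(by omega)) :: h.drop (p + 2)).drop p).take (k2 + 1)).sum ∧
      (∀ j < k2, (((h.take p ++ (h[p]'(by omega) + h[p + 1]'(by omega)) :: h.drop (p + 2)).drop p).take (j + 1)).sum < f) ∧
      (k2 = 0 ∨ cut + k2 ≤ (e.take cut ++ e.drop (cut + 1)).length) := by
  have hL := view_len h p (h[p]'(by omega) + h[p + 1]'(by omega)) hp1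
  have hcut : cut < e.length := by omega
  have heL : (e.take cut ++ e.drop (cut + 1)).length = e.length - 1 := by
    simp
    omega
  refine ⟨k - 1, by omega, by omega, ?_, ?_, ?_⟩
  · rw [sum_bridge h p hp1 (k - 1), show k - 1 + 2 = k + 1 by omega]
    exact hsum
  · intro j hj
    rw [sum_bridge h p hp1 j]
    exact hmin (j + 1) (by omega)
  · rcases Nat.eq_or_lt_of_le hk1 with h1 | h1
    · exact Or.inl (by omega)
    · exact Or.inr (by omega)

-- ===== MAIN INDUCTION =====

theorem main_equiv : ∀ (N : Nat) (hist bin_edges : List Int) (f tl : Int), hist.length ≤ N →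
    Pre_combine_tails hist bin_edges f tl →
    combine_tails hist bin_edges f tl = combine_tails_alt hist bin_edges f tl := by
  intro N
  induction N with
  | zero =>
    intro hist e f tl hlen hpre
    simp only [Pre_combine_tails] at hpre
    obtain ⟨k, hk1, -⟩ := hpre
    have h0 : hist.length = 0 := by omega
    by_cases ht : 0 ≤ tl
    · rw [if_pos ht] at hk1
      omega
    · rw [if_neg ht] at hk1
      simp [h0] at hk1
  | succ N ih =>
    intro hist e f tl hlen hpre
    simp only [Pre_combine_tails] at hpre
    by_cases h0 : 0 ≤ tl
    -- ================= nonnegative tail =================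
    · obtain ⟨p, rfl⟩ : ∃ p : Nat, tl = (p : Int) := ⟨tl.toNat, (Int.toNat_of_nonneg h0).symm⟩
      rw [if_pos h0, if_pos h0, if_pos h0, if_pos h0] at hpre
      obtain ⟨k, hkl, hk, hsum, hmin, hedge⟩ := hpre
      have hpnat : ((p : Int)).toNat = p := by omega
      obtain ⟨cut, hcutd⟩ : ∃ c : Nat, (if (p : Int) = 0 then 1 else ((p : Int) - 1).toNat) = c :=
        ⟨_, rfl⟩
      have hp : p < hist.length := by omega
      have hgetx : PySem.List.pyGet? hist (p : Int) = some (hist[p]'hp) :=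
        pyGet?_idx _ _ _ (pyIdx?_nat _ _ hp) hp
      by_cases hxf : hist[p]'hp < f
      · -- merge step
        have hk1 : 1 ≤ k := k_pos hist f p k hk hsum hxf
        have hp1 : p + 1 < hist.length := by omega
        have hedge' : cut + k ≤ e.length := by
          rcases hedge with h | h
          · omega
          · rw [hcutd] at h
            exact h
        have hcutlen : cut < e.length := by omega
        have hpopx : PySem.List.pop? hist (p : Int) = some (hist[p]'hp, hist.eraseIdx p) :=
          pop?_idx _ _ _ (pyIdx?_nat _ _ hp) hp
        have hlen' : (hist.eraseIdx p).length = hist.length - 1 := by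
          simp [List.length_eraseIdx, hp]
        have hq2 : PySem.List.pyIdx? (hist.eraseIdx p).length (p : Int) = some p := by
          rw [hlen']
          exact pyIdx?_nat _ _ (by omega)
        have hplen2 : p < (hist.eraseIdx p).length := by omega
        have hget2 : PySem.List.pyGet? (hist.eraseIdx p) (p : Int)
            = some ((hist.eraseIdx p)[p]'hplen2) := pyGet?_idx _ _ _ hq2 hplen2
        have hw : (hist.eraseIdx p)[p]'hplen2 = hist[p + 1]'hp1 := by
          rw [List.getElem_eraseIdx]
          simp
        have hqe : (if (p : Int) = 0 then PySem.List.pop? e ((p : Int) + 1)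
              else PySem.List.pop? e ((p : Int) - 1))
            = some (e[cut]'hcutlen, e.eraseIdx cut) := by
          by_cases hp0 : (p : Int) = 0
          · rw [if_pos hp0, hp0]
            have hc1 : cut = 1 := by rw [← hcutd, if_pos hp0]
            subst hc1
            exact pop?_idx _ _ _ (by exact_mod_cast pyIdx?_nat _ _ hcutlen) hcutlen
          · rw [if_neg hp0]
            have hc : ((cut : Nat) : Int) = (p : Int) - 1 := by
              rw [← hcutd, if_neg hp0]
              omega
            rw [← hc]
            exact pop?_idx _ _ _ (pyIdx?_nat _ _ hcutlen) hcutlen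
        have hstep := A_step hist e f (p : Int) _ _ _ _ hgetx hxf hpopx hget2 hqe
        have hset : PySem.List.pySetD (hist.eraseIdx p) (p : Int)
              ((hist.eraseIdx p)[p]'hplen2 + hist[p]'hp)
            = hist.take p ++ (hist[p]'hp + hist[p + 1]'hp1) :: hist.drop (p + 2) := by
          rw [pySetD_idx _ _ _ _ hq2, erase_set_fwd hist p _ hp1, hw, add_comm]
        have he2 : e.eraseIdx cut = e.take cut ++ e.drop (cut + 1) :=
          List.eraseIdx_eq_take_drop_succ e cut
        have hA : combine_tails hist e f (p : Int)
            = combine_tails (hist.take p ++ (hist[p]'hp + hist[p + 1]'hp1) :: hist.drop (p + 2))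
                (e.take cut ++ e.drop (cut + 1)) f (p : Int) := by
          rw [hstep]
          simp only [hset, he2]
        -- B side
        have hscan : (scanMerge (hist.drop p) f 0 0).isSome :=
          scanMerge_isSome _ f 0 0 k (by simp [List.length_drop]; omega) (by simpa using hsum)
        have hcore : (altCore hist e f p cut).isSome := by
          rw [altCore]
          obtain ⟨y, hy⟩ := Option.isSome_iff_exists.mp hscan
          rw [hy]
          cases y
          simp
        obtain ⟨r, hr⟩ := Option.isSome_iff_exists.mp hcore
        have hstepB := altCore_step hist e f p cut hp1 hxf (le_of_lt hcutlen)
        have hr2 : altCore (hist.take p ++ (hist[p]'hp + hist[p + 1]'hp1) :: hist.drop (p + 2))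
            (e.take cut ++ e.drop (cut + 1)) f p cut = some r := by
          rw [← hstepB]
          exact hr
        have hBl : combine_tails_alt hist e f (p : Int) = r := by
          apply alt_pos hist e f (p : Int) h0 r
          rw [hpnat, hcutd]
          exact hr
        have hBr : combine_tails_alt
            (hist.take p ++ (hist[p]'hp + hist[p + 1]'hp1) :: hist.drop (p + 2))
            (e.take cut ++ e.drop (cut + 1)) f (p : Int) = r := by
          apply alt_pos _ _ f (p : Int) h0 r
          rw [hpnat, hcutd]
          exact hr2
        have hpre2 : Pre_combine_tails
            (hist.take p ++ (hist[p]'hp + hist[p + 1]'hp1) :: hist.drop (p + 2))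
            (e.take cut ++ e.drop (cut + 1)) f (p : Int) := by
          simp only [Pre_combine_tails, if_pos h0, hpnat, hcutd]
          exact pre_data_step hist e f p cut k hp1 hk hsum hmin hk1 hedge'
        have hlen2 : (hist.take p ++ (hist[p]'hp + hist[p + 1]'hp1) :: hist.drop (p + 2)).length ≤ N := by
          rw [view_len hist p _ hp1]
          omega
        rw [hA, ih _ _ f (p : Int) hlen2 hpre2, hBr, ← hBl]
      · -- stop
        rw [A_stop hist e f (p : Int) _ hgetx hxf]
        have hr := altCore_stop hist e f p cut hp (le_of_not_gt hxf)
        have hBs : combine_tails_alt hist e f (p : Int) = (hist, e) := by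
          apply alt_pos hist e f (p : Int) h0 (hist, e)
          rw [hpnat, hcutd]
          exact hr
        rw [hBs]
    -- ================= negative tail =================
    · obtain ⟨kk, hkk1, rfl⟩ : ∃ kk : Nat, 1 ≤ kk ∧ tl = -(kk : Int) := by
        refine ⟨(-tl).toNat, by omega, by omega⟩
      rw [if_neg h0, if_neg h0, if_neg h0, if_neg h0] at hpre
      obtain ⟨k, hkl, hk, hsum, hmin, hedge⟩ := hpre
      have hpv : (-(-(kk : Int)) - 1).toNat = kk - 1 := by omega
      have hcv : (-(-(kk : Int))).toNat = kk := by omega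
      rw [hpv] at hk hsum hmin
      rw [hcv] at hedge
      have hlrev : hist.reverse.length = hist.length := by simp
      have hp : kk - 1 < hist.length := by omega
      have hkklen : kk ≤ hist.length := by omega
      have hidx : PySem.List.pyIdx? hist.length (-(kk : Int)) = some (hist.length - kk) :=
        pyIdx?_neg _ _ (by omega) hkklen
      have hilen : hist.length - kk < hist.length := by omega
      have hgetx : PySem.List.pyGet? hist (-(kk : Int)) = some (hist[hist.length - kk]'hilen) :=
        pyGet?_idx _ _ _ hidx hilen
      have hgp : hist.reverse[kk - 1]'(by rw [hlrev]; omega) = hist[hist.length - kk]'hilen := by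
        rw [List.getElem_reverse]
        congr 1
        omega
      by_cases hxf : hist[hist.length - kk]'hilen < f
      · -- merge step
        have hxr : hist.reverse[kk - 1]'(by rw [hlrev]; omega) < f := by
          rw [hgp]
          exact hxf
        have hk1 : 1 ≤ k := k_pos hist.reverse f (kk - 1) k (by rw [hlrev]; omega) hsum hxr
        have hp1 : kk - 1 + 1 < hist.length := by omega
        have hkklen1 : kk ≤ hist.length - 1 := by omega
        have hi1 : 1 ≤ hist.length - kk := by omega
        have hedge' : kk + k ≤ e.length := by
          rcases hedge with h | h
          · omega
          · simpa using h
        have hcutlen : kk < e.length := by omega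
        have hpopx : PySem.List.pop? hist (-(kk : Int))
            = some (hist[hist.length - kk]'hilen, hist.eraseIdx (hist.length - kk)) :=
          pop?_idx _ _ _ hidx hilen
        have hlen' : (hist.eraseIdx (hist.length - kk)).length = hist.length - 1 := by
          simp [List.length_eraseIdx, hilen]
        have hq2 : PySem.List.pyIdx? (hist.eraseIdx (hist.length - kk)).length (-(kk : Int))
            = some (hist.length - kk - 1) := by
          rw [hlen', pyIdx?_neg _ _ (by omega) (by omega)]
          congr 1
          omega
        have hplen2 : hist.length - kk - 1 < (hist.eraseIdx (hist.length - kk)).length := by omega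
        have hget2 : PySem.List.pyGet? (hist.eraseIdx (hist.length - kk)) (-(kk : Int))
            = some ((hist.eraseIdx (hist.length - kk))[hist.length - kk - 1]'hplen2) :=
          pyGet?_idx _ _ _ hq2 hplen2
        have hw : (hist.eraseIdx (hist.length - kk))[hist.length - kk - 1]'hplen2
            = hist[hist.length - kk - 1]'(by omega) := by
          rw [List.getElem_eraseIdx]
          rw [dif_pos (by omega)]
        have hqe : (if (-(kk : Int)) = 0 then PySem.List.pop? e ((-(kk : Int)) + 1)
              else PySem.List.pop? e ((-(kk : Int)) - 1))
            = some (e[e.length - (kk + 1)]'(by omega), e.eraseIdx (e.length - (kk + 1))) := by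
          rw [if_neg (by omega), show (-(kk : Int)) - 1 = -((kk + 1 : Nat) : Int) by push_cast; ring]
          exact pop?_idx _ _ _ (pyIdx?_neg _ _ (by omega) (by omega)) (by omega)
        have hstep := A_step hist e f (-(kk : Int)) _ _ _ _ hgetx hxf hpopx hget2 hqe
        have hset : PySem.List.pySetD (hist.eraseIdx (hist.length - kk)) (-(kk : Int))
              ((hist.eraseIdx (hist.length - kk))[hist.length - kk - 1]'hplen2 + hist[hist.length - kk]'hilen)
            = hist.take (hist.length - kk - 1)
                ++ (hist[hist.length - kk - 1]'(by omega) + hist[hist.length - kk]'hilen)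
                :: hist.drop (hist.length - kk + 1) := by
          rw [pySetD_idx _ _ _ _ hq2, erase_set_bwd hist (hist.length - kk) _ hi1 hilen, hw]
        have he2 : e.eraseIdx (e.length - (kk + 1))
            = e.take (e.length - (kk + 1)) ++ e.drop (e.length - (kk + 1) + 1) :=
          List.eraseIdx_eq_take_drop_succ e _
        have hA : combine_tails hist e f (-(kk : Int))
            = combine_tails
                (hist.take (hist.length - kk - 1)
                  ++ (hist[hist.length - kk - 1]'(by omega) + hist[hist.length - kk]'hilen)
                  :: hist.drop (hist.length - kk + 1))
                (e.eraseIdx (e.length - (kk + 1))) f (-(kk : Int)) := by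
          rw [hstep]
          simp only [hset]
        -- oriented views
        have hgp1 : hist.reverse[kk - 1 + 1]'(by rw [hlrev]; omega)
            = hist[hist.length - kk - 1]'(by omega) := by
          rw [List.getElem_reverse]
          congr 1
          omega
        have hrev2 : (hist.take (hist.length - kk - 1)
              ++ (hist[hist.length - kk - 1]'(by omega) + hist[hist.length - kk]'hilen)
              :: hist.drop (hist.length - kk + 1)).reverse
            = hist.reverse.take (kk - 1)
              ++ (hist.reverse[kk - 1]'(by rw [hlrev]; omega) + hist.reverse[kk - 1 + 1]'(by rw [hlrev]; omega))
              :: hist.reverse.drop (kk - 1 + 2) := by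
          rw [reverse_mid, List.reverse_drop, List.reverse_take,
            show hist.length - (hist.length - kk + 1) = kk - 1 by omega,
            show hist.length - (hist.length - kk - 1) = kk - 1 + 2 by omega, hgp, hgp1, add_comm]
        have herev2 : (e.eraseIdx (e.length - (kk + 1))).reverse
            = e.reverse.take kk ++ e.reverse.drop (kk + 1) := by
          rw [he2, List.reverse_append, List.reverse_drop, List.reverse_take,
            show e.length - (e.length - (kk + 1) + 1) = kk by omega,
            show e.length - (e.length - (kk + 1)) = kk + 1 by omega]
        -- B side
        have hscan : (scanMerge (hist.reverse.drop (kk - 1)) f 0 0).isSome :=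
          scanMerge_isSome _ f 0 0 k (by simp [List.length_drop]; omega) (by simpa using hsum)
        have hcore : (altCore hist.reverse e.reverse f (kk - 1) kk).isSome := by
          rw [altCore]
          obtain ⟨y, hy⟩ := Option.isSome_iff_exists.mp hscan
          rw [hy]
          cases y
          simp
        obtain ⟨r, hr⟩ := Option.isSome_iff_exists.mp hcore
        have hstepB := altCore_step hist.reverse e.reverse f (kk - 1) kk
          (by rw [hlrev]; omega) hxr (by simpa using le_of_lt hcutlen)
        have hr2 : altCore (hist.take (hist.length - kk - 1)
              ++ (hist[hist.length - kk - 1]'(by omega) + hist[hist.length - kk]'hilen)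
              :: hist.drop (hist.length - kk + 1)).reverse
            (e.eraseIdx (e.length - (kk + 1))).reverse f (kk - 1) kk = some r := by
          rw [hrev2, herev2, ← hstepB]
          exact hr
        have hBl : combine_tails_alt hist e f (-(kk : Int)) = (r.1.reverse, r.2.reverse) := by
          apply alt_neg hist e f (-(kk : Int)) h0 r
          rw [hpv, hcv]
          exact hr
        have hBr : combine_tails_alt
            (hist.take (hist.length - kk - 1)
              ++ (hist[hist.length - kk - 1]'(by omega) + hist[hist.length - kk]'hilen)
              :: hist.drop (hist.length - kk + 1))
            (e.eraseIdx (e.length - (kk + 1))) f (-(kk : Int)) = (r.1.reverse, r.2.reverse) := by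
          apply alt_neg _ _ f (-(kk : Int)) h0 r
          rw [hpv, hcv]
          exact hr2
        have hpre2 : Pre_combine_tails
            (hist.take (hist.length - kk - 1)
              ++ (hist[hist.length - kk - 1]'(by omega) + hist[hist.length - kk]'hilen)
              :: hist.drop (hist.length - kk + 1))
            (e.eraseIdx (e.length - (kk + 1))) f (-(kk : Int)) := by
          simp only [Pre_combine_tails, if_neg h0, hpv, hcv]
          rw [hrev2, herev2]
          exact pre_data_step hist.reverse e.reverse f (kk - 1) kk k (by rw [hlrev]; omega)
            (by rw [hlrev]; omega) hsum hmin hk1 (by simpa using hedge')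
        have hlen2 : (hist.take (hist.length - kk - 1)
              ++ (hist[hist.length - kk - 1]'(by omega) + hist[hist.length - kk]'hilen)
              :: hist.drop (hist.length - kk + 1)).length ≤ N := by
          simp [List.length_take, List.length_drop]
          omega
        rw [hA, ih _ _ f (-(kk : Int)) hlen2 hpre2, hBr, ← hBl]
      · -- stop
        rw [A_stop hist e f (-(kk : Int)) _ hgetx hxf]
        have hxr : f ≤ hist.reverse[kk - 1]'(by rw [hlrev]; omega) := by
          rw [hgp]
          exact le_of_not_gt hxf
        have hr := altCore_stop hist.reverse e.reverse f (kk - 1) kk (by rw [hlrev]; omega) hxr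
        have hBs : combine_tails_alt hist e f (-(kk : Int))
            = ((hist.reverse : List Int).reverse, (e.reverse : List Int).reverse) := by
          apply alt_neg hist e f (-(kk : Int)) h0 (hist.reverse, e.reverse)
          rw [hpv, hcv]
          exact hr
        rw [hBs]
        simp

-- ===== VERDICT (by name: the statement is the Claim_ definition above) =====
theorem combine_tails_spec : Claim_equal_combine_tails := by
  intro hist bin_edges f tl _ hpre
  unfold Spec_combine_tails
  exact main_equiv hist.length hist bin_edges f tl le_rfl hpre
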